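-- pv_equiv track=rewrite | github.com/TakaIshikawa/blueprint | src/blueprint/task_authorization_boundary.py | _escalation_reasons
-- ===== SOURCE A (Python) =====
-- from typing import Any, Literal, Mapping
--
-- AuthorizationBoundaryConcern = Literal[
--     "authentication",
--     "authorization",
--     "rbac",
--     "ownership",
--     "tenant_isolation",
--     "admin_access",
--     "impersonation",
--     "permission_migration",
--     "auth_policy",
-- ]
--
-- def _escalation_reasons(
--     concerns: tuple[AuthorizationBoundaryConcern, ...],
-- ) -> tuple[str, ...]:
--     reasons = ["Authorization-sensitive task requires explicit boundary review before autonomous execution."]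
--     if any(concern in concerns for concern in ("rbac", "authorization", "auth_policy")):
--         reasons.append("Permission semantics or policy behavior can grant unintended access.")
--     if "tenant_isolation" in concerns:
--         reasons.append("Tenant or workspace boundary changes can expose one customer's data to another.")
--     if any(concern in concerns for concern in ("admin_access", "impersonation")):
--         reasons.append("Privileged or impersonated access needs independent approval and audit coverage.")
--     if "permission_migration" in concerns:
--         reasons.append("Permission migration can silently preserve, remove, or broaden access at scale.")
--     return tuple(_dedupe(reasons))
--
-- def _dedupe(values: list[str] | tuple[str, ...]) -> list[str]:
--     seen: set[str] = set()
--     result: list[str] = []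
--     for value in values:
--         key = value.casefold()
--         if key in seen:
--             continue
--         seen.add(key)
--         result.append(value)
--     return result
-- ===== SOURCE B (Python) =====
-- _BASE = "Authorization-sensitive task requires explicit boundary review before autonomous execution."
--
-- # concern -> index of the rule it fires
-- _RULE_OF = {
--     "rbac": 0,
--     "authorization": 0,
--     "auth_policy": 0,
--     "tenant_isolation": 1,
--     "admin_access": 2,
--     "impersonation": 2,
--     "permission_migration": 3,
-- }
--
-- _MESSAGES = (
--     "Permission semantics or policy behavior can grant unintended access.",
--     "Tenant or workspace boundary changes can expose one customer's data to another.",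
--     "Privileged or impersonated access needs independent approval and audit coverage.",
--     "Permission migration can silently preserve, remove, or broaden access at scale.",
-- )
--
-- def _escalation_reasons(concerns):
--     fired = [False] * 4
--     for c in concerns:
--         i = _RULE_OF.get(c)
--         if i is not None:
--             fired[i] = True
--     return (_BASE,) + tuple(m for f, m in zip(fired, _MESSAGES) if f)
-- ===== Notes on version B (the rewrite author's own statement) =====
-- stated objective: alternative
-- what changed: Inverted the traversal: instead of A's four branch conditions each scanning the concerns tuple (plus a casefold-dedupe pass), B makes a single pass over the concerns, marking fired rules via a constant concern-to-rule dictionary, then emits the base string plus the messages of the fired rules in fixed order; the dedupe pass is dropped since the five messages are pairwise distinct.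
import Mathlib
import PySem

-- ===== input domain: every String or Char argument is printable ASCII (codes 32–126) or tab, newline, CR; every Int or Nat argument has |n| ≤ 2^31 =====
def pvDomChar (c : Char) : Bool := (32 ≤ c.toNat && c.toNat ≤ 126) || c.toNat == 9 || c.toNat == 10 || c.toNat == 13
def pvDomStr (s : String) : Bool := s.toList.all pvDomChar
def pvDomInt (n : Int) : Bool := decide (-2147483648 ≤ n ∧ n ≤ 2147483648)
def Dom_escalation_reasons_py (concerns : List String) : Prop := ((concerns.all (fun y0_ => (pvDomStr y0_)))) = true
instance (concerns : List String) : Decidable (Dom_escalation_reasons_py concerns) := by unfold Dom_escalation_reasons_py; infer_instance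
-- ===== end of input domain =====

-- ===== PORT A =====
-- header: B replaces A's per-branch membership tests + casefold-dedupe pass by one pass
-- over the concerns with a concern→rule dictionary (alternative decomposition); return value only.
-- casefold on these ASCII-only message strings equals lower; ported with PySem.Str.lower (exact on this input).
def pvDedupeLoop (values : List String) (seen : PySem.Set String) (result : List String) : List String :=
  match values with
  | [] => result
  | v :: rest =>
    let key := PySem.Str.lower v
    if PySem.Set.contains seen key then pvDedupeLoop rest seen result
    else pvDedupeLoop rest (PySem.Set.add seen key) (result ++ [v])

def escalation_reasons_py (concerns : List String) : List String :=
  let reasons := ["Authorization-sensitive task requires explicit boundary review before autonomous execution."]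
  let reasons := if ["rbac", "authorization", "auth_policy"].any (fun c => concerns.contains c) then
      reasons ++ ["Permission semantics or policy behavior can grant unintended access."] else reasons
  let reasons := if concerns.contains "tenant_isolation" then
      reasons ++ ["Tenant or workspace boundary changes can expose one customer's data to another."] else reasons
  let reasons := if ["admin_access", "impersonation"].any (fun c => concerns.contains c) then
      reasons ++ ["Privileged or impersonated access needs independent approval and audit coverage."] else reasons
  let reasons := if concerns.contains "permission_migration" then
      reasons ++ ["Permission migration can silently preserve, remove, or broaden access at scale."] else reasons
  pvDedupeLoop reasons PySem.Set.empty []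

-- ===== PORT B =====
def pvRuleOf : PySem.Dict String Nat :=
  PySem.Dict.ofList
    [("rbac", 0), ("authorization", 0), ("auth_policy", 0), ("tenant_isolation", 1),
     ("admin_access", 2), ("impersonation", 2), ("permission_migration", 3)]

def pvMessages : List String :=
  [ "Permission semantics or policy behavior can grant unintended access.",
    "Tenant or workspace boundary changes can expose one customer's data to another.",
    "Privileged or impersonated access needs independent approval and audit coverage.",
    "Permission migration can silently preserve, remove, or broaden access at scale." ]

def escalation_reasons_py_alt (concerns : List String) : List String :=
  let fired := concerns.foldl (fun f c =>
    match PySem.Dict.get? pvRuleOf c with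
    | some i => f.set i true
    | none => f) [false, false, false, false]
  "Authorization-sensitive task requires explicit boundary review before autonomous execution." ::
    (fired.zip pvMessages).filterMap (fun p => if p.1 then some p.2 else none)

-- ===== PRECONDITION & SPEC =====
def Spec_escalation_reasons_py (concerns : List String) (out : List String) : Prop := out = escalation_reasons_py_alt concerns
instance (concerns : List String) (out : List String) : Decidable (Spec_escalation_reasons_py concerns out) := by unfold Spec_escalation_reasons_py; infer_instance

-- ===== CLAIM (what is proved, stated in full; the proofs are below) =====
def Claim_equal_escalation_reasons_py : Prop := ∀ (concerns : List String), Dom_escalation_reasons_py concerns → Spec_escalation_reasons_py concerns (escalation_reasons_py concerns)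

-- ===== LEMMAS AND PROOFS =====

-- the fired-flags fold, characterised by membership tests
theorem pvFire_eq (cs : List String) : ∀ (a b c d : Bool),
    cs.foldl (fun f c =>
      match PySem.Dict.get? pvRuleOf c with
      | some i => f.set i true
      | none => f) [a, b, c, d] =
    [a || (cs.contains "rbac" || (cs.contains "authorization" || cs.contains "auth_policy")),
     b || cs.contains "tenant_isolation",
     c || (cs.contains "admin_access" || cs.contains "impersonation"),
     d || cs.contains "permission_migration"] := by
  induction cs with
  | nil => intro a b c d; simp
  | cons x xs ih =>
    intro a b c d
    simp only [List.foldl_cons, List.contains_cons]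
    by_cases h1 : x = "rbac"
    · subst h1
      rw [show PySem.Dict.get? pvRuleOf "rbac" = some 0 from rfl]
      simp [ih, Bool.or_assoc, Bool.or_comm]
    by_cases h2 : x = "authorization"
    · subst h2
      rw [show PySem.Dict.get? pvRuleOf "authorization" = some 0 from rfl]
      simp [ih, Bool.or_assoc, Bool.or_comm]
    by_cases h3 : x = "auth_policy"
    · subst h3
      rw [show PySem.Dict.get? pvRuleOf "auth_policy" = some 0 from rfl]
      simp [ih, Bool.or_assoc, Bool.or_comm]
    by_cases h4 : x = "tenant_isolation"
    · subst h4
      rw [show PySem.Dict.get? pvRuleOf "tenant_isolation" = some 1 from rfl]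
      simp [ih, Bool.or_assoc, Bool.or_comm]
    by_cases h5 : x = "admin_access"
    · subst h5
      rw [show PySem.Dict.get? pvRuleOf "admin_access" = some 2 from rfl]
      simp [ih, Bool.or_assoc, Bool.or_comm]
    by_cases h6 : x = "impersonation"
    · subst h6
      rw [show PySem.Dict.get? pvRuleOf "impersonation" = some 2 from rfl]
      simp [ih, Bool.or_assoc, Bool.or_comm]
    by_cases h7 : x = "permission_migration"
    · subst h7
      rw [show PySem.Dict.get? pvRuleOf "permission_migration" = some 3 from rfl]
      simp [ih, Bool.or_assoc, Bool.or_comm]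
    have hitems : pvRuleOf.items =
        [("rbac", (0 : Nat)), ("authorization", 0), ("auth_policy", 0), ("tenant_isolation", 1),
         ("admin_access", 2), ("impersonation", 2), ("permission_migration", 3)] := rfl
    have e1 : ("rbac" == x) = false := by simpa [beq_iff_eq] using Ne.symm h1
    have e2 : ("authorization" == x) = false := by simpa [beq_iff_eq] using Ne.symm h2
    have e3 : ("auth_policy" == x) = false := by simpa [beq_iff_eq] using Ne.symm h3
    have e4 : ("tenant_isolation" == x) = false := by simpa [beq_iff_eq] using Ne.symm h4
    have e5 : ("admin_access" == x) = false := by simpa [beq_iff_eq] using Ne.symm h5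
    have e6 : ("impersonation" == x) = false := by simpa [beq_iff_eq] using Ne.symm h6
    have e7 : ("permission_migration" == x) = false := by simpa [beq_iff_eq] using Ne.symm h7
    have hn : PySem.Dict.get? pvRuleOf x = none := by
      simp only [PySem.Dict.get?, hitems]
      simp [List.find?, e1, e2, e3, e4, e5, e6, e7]
    rw [hn]
    simp [ih, e1, e2, e3, e4, e5, e6, e7]

-- ===== VERDICT (by name: the statement is the Claim_ definition above) =====
theorem escalation_reasons_py_spec : Claim_equal_escalation_reasons_py := by
  unfold Claim_equal_escalation_reasons_py Spec_escalation_reasons_py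
  intro concerns _
  unfold escalation_reasons_py escalation_reasons_py_alt
  simp only [pvFire_eq, Bool.false_or, Bool.or_false, List.any_cons, List.any_nil]
  generalize (concerns.contains "rbac" || (concerns.contains "authorization" ||
    concerns.contains "auth_policy")) = b1
  generalize concerns.contains "tenant_isolation" = b2
  generalize (concerns.contains "admin_access" || concerns.contains "impersonation") = b3
  generalize concerns.contains "permission_migration" = b4
  revert b1 b2 b3 b4
  decide
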